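-- pv_equiv track=rewrite | github.com/f228476653/moneyTracking | statements/wealthsimple_parser.py | _is_portfolio_equities_table
-- ===== SOURCE A (Python) =====
-- def _is_portfolio_equities_table(table) -> bool:
--     """Check if a table contains portfolio equities data"""
--     if not table or len(table) < 2:
--         return False
--
--     # Check header row for equity-related keywords
--     header_row = table[0]
--     if header_row:
--         header_text = ' '.join(str(cell) for cell in header_row if cell).lower()
--         equity_keywords = ['symbol', 'name', 'shares', 'price', 'value', 'weight', 'return']
--         return any(keyword in header_text for keyword in equity_keywords)
--
--     return False
-- ===== SOURCE B (Python) =====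
-- EQUITY_KEYWORDS = ['symbol', 'name', 'shares', 'price', 'value', 'weight', 'return']
--
--
-- def _is_portfolio_equities_table(table) -> bool:
--     """Check if a table contains portfolio equities data"""
--     if not table or len(table) < 2:
--         return False
--     # Scan each truthy header cell on its own: no joined aggregate string.
--     return any(
--         any(keyword in str(cell).lower() for keyword in EQUITY_KEYWORDS)
--         for cell in table[0] if cell
--     )
-- ===== Notes on version B (the rewrite author's own statement) =====
-- stated objective: simpler
-- what changed: B drops the joined-and-lowered aggregate header string and instead tests each truthy header cell independently for a keyword substring (nested any over cells then keywords); equivalent because no keyword contains a space, so no match can cross a cell boundary.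
import Mathlib
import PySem

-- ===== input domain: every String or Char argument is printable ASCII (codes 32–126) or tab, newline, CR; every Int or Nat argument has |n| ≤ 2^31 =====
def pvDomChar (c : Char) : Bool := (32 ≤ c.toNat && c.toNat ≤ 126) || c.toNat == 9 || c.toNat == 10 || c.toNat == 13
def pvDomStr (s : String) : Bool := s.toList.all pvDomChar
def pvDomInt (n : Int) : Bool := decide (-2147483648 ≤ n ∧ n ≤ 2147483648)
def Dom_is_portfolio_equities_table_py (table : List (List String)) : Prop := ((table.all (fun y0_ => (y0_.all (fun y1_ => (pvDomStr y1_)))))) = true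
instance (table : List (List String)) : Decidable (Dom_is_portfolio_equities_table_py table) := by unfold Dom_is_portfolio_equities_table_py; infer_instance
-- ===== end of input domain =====

-- B replaces A's joined-and-lowered aggregate header string by an independent per-cell
-- keyword scan (simpler decomposition; exact because no keyword contains a space).

-- ===== PORT A =====
def equity_keywords : List String := ["symbol", "name", "shares", "price", "value", "weight", "return"]

def is_portfolio_equities_table_py (table : List (List String)) : Bool :=
  if table = [] ∨ table.length < 2 then false
  else
    let header_row := table.headD []
    if header_row ≠ [] then
      let header_text := PySem.Str.lower
        (PySem.Str.join " " (header_row.filter (fun cell => decide (cell ≠ ""))))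
      equity_keywords.any (fun keyword => PySem.Str.isIn keyword header_text)
    else false

-- ===== PORT B =====
def is_portfolio_equities_table_py_alt (table : List (List String)) : Bool :=
  match table with
  | [] => false
  | [_] => false
  | header_row :: _ :: _ =>
      header_row.any (fun cell =>
        decide (cell ≠ "") &&
          equity_keywords.any (fun keyword => PySem.Str.isIn keyword (PySem.Str.lower cell)))

-- ===== PRECONDITION & SPEC =====
def Spec_is_portfolio_equities_table_py (table : List (List String)) (out : Bool) : Prop := out = is_portfolio_equities_table_py_alt table
instance (table : List (List String)) (out : Bool) : Decidable (Spec_is_portfolio_equities_table_py table out) := by unfold Spec_is_portfolio_equities_table_py; infer_instance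

-- ===== CLAIM (what is proved, stated in full; the proofs are below) =====
def Claim_equal_is_portfolio_equities_table_py : Prop := ∀ (table : List (List String)), Dom_is_portfolio_equities_table_py table → Spec_is_portfolio_equities_table_py table (is_portfolio_equities_table_py table)

-- ===== LEMMAS AND PROOFS =====

-- ===== VERDICT (by name: the statement is the Claim_ definition above) =====
-- kw is a prefix of Y ++ c :: Z but does not contain c, so it already sits inside Y
lemma pv_prefix_of_prefix_append_cons {kw Y Z : List Char} {c : Char}
    (hc : c ∉ kw) (h : kw <+: Y ++ c :: Z) : kw <+: Y := by
  by_cases hl : kw.length ≤ Y.length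
  · have htake : kw = (Y ++ c :: Z).take kw.length := by
      rw [List.prefix_iff_eq_take] at h; exact h
    rw [List.take_append_of_le_length hl] at htake
    exact htake ▸ List.take_prefix _ _
  · exfalso
    have hy : Y.length < kw.length := by omega
    have hyl : Y.length < (Y ++ c :: Z).length := by simp
    have h1 := h.getElem hy
    have hcc : (Y ++ c :: Z)[Y.length] = c := by
      simp [List.getElem_append_right (Nat.le_refl Y.length)]
    have h2 : kw[Y.length] = c := h1.trans hcc
    exact hc (h2 ▸ List.getElem_mem hy)

-- a separator character absent from kw can never be inside a match
lemma pv_infix_append_cons_iff {kw : List Char} (hne : kw ≠ []) {c : Char} (hc : c ∉ kw) :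
    ∀ Y Z : List Char, (kw <:+: Y ++ c :: Z ↔ kw <:+: Y ∨ kw <:+: Z) := by
  intro Y
  induction Y with
  | nil =>
    intro Z
    simp only [List.nil_append, List.infix_cons_iff]
    constructor
    · rintro (hp | hi)
      · exfalso
        obtain ⟨k, ks, rfl⟩ : ∃ k ks, kw = k :: ks := by
          cases kw with | nil => exact absurd rfl hne | cons k ks => exact ⟨k, ks, rfl⟩
        obtain ⟨t, ht⟩ := hp
        have : k = c := (by simpa using congrArg (fun l => l.headD c) ht.symm : c = k).symm
        exact hc (this ▸ List.mem_cons_self)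
      · exact Or.inr hi
    · rintro (h | h)
      · simp at h; exact absurd h hne
      · exact Or.inr h
  | cons a Y ih =>
    intro Z
    rw [List.cons_append]
    simp only [List.infix_cons_iff, ih Z]
    constructor
    · rintro (hp | hY | hZ)
      · exact Or.inl (Or.inl (pv_prefix_of_prefix_append_cons hc hp))
      · exact Or.inl (Or.inr hY)
      · exact Or.inr hZ
    · rintro ((hp | hY) | hZ)
      · exact Or.inl (hp.trans (List.prefix_append _ _))
      · exact Or.inr (Or.inl hY)
      · exact Or.inr (Or.inr hZ)

-- a space-free keyword matches ' '.join(parts) iff it matches some part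
lemma pv_join_space_infix {kw : List Char} (hne : kw ≠ []) (hc : (' ' : Char) ∉ kw) :
    ∀ parts : List (List Char),
      (kw <:+: PySem.Chars.join [' '] parts ↔ ∃ p ∈ parts, kw <:+: p) := by
  intro parts
  induction parts with
  | nil => simp [PySem.Chars.join_nil, hne]
  | cons p tail ih =>
    cases tail with
    | nil => simp [PySem.Chars.join_singleton]
    | cons q rest =>
      rw [PySem.Chars.join_cons_cons]
      have : p ++ [' '] ++ PySem.Chars.join [' '] (q :: rest)
           = p ++ ' ' :: PySem.Chars.join [' '] (q :: rest) := by simp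
      rw [this, pv_infix_append_cons_iff hne hc, ih]
      simp only [List.mem_cons]
      constructor
      · rintro (h | ⟨x, hx, h⟩)
        · exact ⟨p, Or.inl rfl, h⟩
        · exact ⟨x, Or.inr hx, h⟩
      · rintro ⟨x, (rfl | hx), h⟩
        · exact Or.inl h
        · exact Or.inr ⟨x, hx, h⟩

-- lowering distributes over the space-join (lowerChar fixes ' ')
lemma pv_lower_join (parts : List (List Char)) :
    PySem.Chars.lower (PySem.Chars.join [' '] parts)
      = PySem.Chars.join [' '] (parts.map PySem.Chars.lower) := by
  induction parts with
  | nil => simp [PySem.Chars.join_nil, PySem.Chars.lower]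
  | cons p tail ih =>
    cases tail with
    | nil => simp [PySem.Chars.join_singleton]
    | cons q rest =>
      have hsp : List.map PySem.Chars.lowerChar [' '] = [' '] := by decide
      simp only [List.map_cons] at ih ⊢
      rw [PySem.Chars.join_cons_cons, PySem.Chars.join_cons_cons]
      simp only [PySem.Chars.lower] at ih ⊢
      rw [List.map_append, List.map_append, hsp, ih]

lemma pv_keywords_ok : ∀ kw ∈ equity_keywords, kw.toList ≠ [] ∧ (' ' : Char) ∉ kw.toList := by
  decide

-- ===== VERDICT (by name: the statement is the Claim_ definition above) =====
theorem is_portfolio_equities_table_py_spec : Claim_equal_is_portfolio_equities_table_py := by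
  intro table _
  unfold Spec_is_portfolio_equities_table_py
  match table with
  | [] => rfl
  | [_] => rfl
  | header :: b :: rest =>
    rw [Bool.eq_iff_iff]
    show (is_portfolio_equities_table_py (header :: b :: rest) = true ↔ _)
    unfold is_portfolio_equities_table_py is_portfolio_equities_table_py_alt
    by_cases hh : header = []
    · subst hh; simp
    · simp only [List.headD_cons, if_neg (by simp : ¬(header :: b :: rest = [] ∨
        (header :: b :: rest).length < 2)), if_pos (by simpa using hh), List.any_eq_true,
        Bool.and_eq_true, decide_eq_true_eq, PySem.Str.isIn_iff_infix]
      have hjoin : (PySem.Str.lower (PySem.Str.join " "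
          (header.filter (fun cell => decide (cell ≠ ""))))).toList
          = PySem.Chars.join [' ']
              (((header.filter (fun cell => decide (cell ≠ ""))).map String.toList).map
                PySem.Chars.lower) := by
        simp only [PySem.Str.toList_lower, PySem.Str.toList_join]
        have : (" " : String).toList = [' '] := rfl
        rw [this, pv_lower_join]
      simp only [hjoin, PySem.Str.toList_lower]
      constructor
      · rintro ⟨kw, hkw, hin⟩
        obtain ⟨hne, hsp⟩ := pv_keywords_ok kw hkw
        obtain ⟨p, hp, hinf⟩ := (pv_join_space_infix hne hsp _).mp hin
        simp only [List.mem_map, List.mem_filter, decide_eq_true_eq] at hp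
        obtain ⟨q, ⟨⟨cell, ⟨hcm, hcne⟩, rfl⟩, rfl⟩⟩ := hp
        refine ⟨cell, hcm, hcne, kw, hkw, ?_⟩
        simpa [PySem.Str.toList_lower] using hinf
      · rintro ⟨cell, hcm, hcne, kw, hkw, hinf⟩
        obtain ⟨hne, hsp⟩ := pv_keywords_ok kw hkw
        refine ⟨kw, hkw, (pv_join_space_infix hne hsp _).mpr ?_⟩
        refine ⟨PySem.Chars.lower cell.toList, ?_, by simpa [PySem.Str.toList_lower] using hinf⟩
        simp only [List.mem_map, List.mem_filter, decide_eq_true_eq]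
        exact ⟨cell.toList, ⟨cell, ⟨hcm, hcne⟩, rfl⟩, rfl⟩
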